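-- pv_equiv track=rewrite | github.com/Hou-Lab-CSHL/cheese3d | packages/cheese3d-annotator/cheese3d_annotator/data_visualizer/qc_video.py | _parse_keypoint_bases
-- ===== SOURCE A (Python) =====
-- from typing import Dict, Tuple, List, Optional
--
-- def _parse_keypoint_bases(columns: List[str]) -> List[str]:
--     cols = set(columns)
--     bases: List[str] = []
--     for c in cols:
--         if c.endswith("_x"):
--             b = c[:-2]
--             if f"{b}_y" in cols and f"{b}_z" in cols:
--                 bases.append(b)
--     bases.sort()
--     return bases
-- ===== SOURCE B (Python) =====
-- from typing import List
--
-- def _parse_keypoint_bases(columns: List[str]) -> List[str]: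
--     # group columns by base: base -> set of coordinate suffixes seen
--     groups = {}
--     for c in columns:
--         for s in ("x", "y", "z"):
--             if c.endswith("_" + s):
--                 groups.setdefault(c[:-2], set()).add(s)
--     return sorted(b for b, seen in groups.items() if len(seen) == 3)
-- ===== Notes on version B (the rewrite author's own statement) =====
-- stated objective: alternative
-- what changed: Replaces A's per-x-column membership probing of a set of column names by a single grouping pass that builds a dict from base name to the set of coordinate suffixes seen, then keeps the bases whose suffix set is complete.
import Mathlib
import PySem

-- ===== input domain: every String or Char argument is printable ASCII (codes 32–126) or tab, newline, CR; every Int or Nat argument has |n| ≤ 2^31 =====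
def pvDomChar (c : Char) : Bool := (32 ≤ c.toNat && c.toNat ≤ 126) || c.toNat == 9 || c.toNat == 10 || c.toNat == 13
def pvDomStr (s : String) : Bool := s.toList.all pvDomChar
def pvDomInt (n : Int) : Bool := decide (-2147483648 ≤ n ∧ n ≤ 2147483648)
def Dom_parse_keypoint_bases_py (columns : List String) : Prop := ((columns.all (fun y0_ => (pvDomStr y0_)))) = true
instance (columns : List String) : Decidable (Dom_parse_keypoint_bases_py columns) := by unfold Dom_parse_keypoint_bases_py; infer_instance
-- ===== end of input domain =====

-- B replaces A's per-x-column membership probing by one grouping pass that maps each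
-- base name to the set of coordinate suffixes seen, keeping complete groups (objective: alternative).

-- ===== PORT A =====
def parse_keypoint_bases_py (columns : List String) : List String :=
  let cols := PySem.Set.ofList columns
  let bases : List String := cols.foldl (fun bases c =>
    if PySem.Str.endswith c "_x" then
      let b := PySem.Str.slice c none (some (-2))
      if PySem.Set.contains cols (b ++ "_y") && PySem.Set.contains cols (b ++ "_z")
      then bases ++ [b] else bases
    else bases) []
  PySem.List.sorted bases (fun x => x) false

-- ===== PORT B =====
def parse_keypoint_bases_py_alt (columns : List String) : List String :=
  let groups : PySem.Dict String (PySem.Set String) :=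
    columns.foldl (fun d c =>
      (["x", "y", "z"] : List String).foldl (fun d s =>
        if PySem.Str.endswith c ("_" ++ s) then
          PySem.Dict.modify d (PySem.Str.slice c none (some (-2))) []
            (fun seen => PySem.Set.add seen s)
        else d) d)
      PySem.Dict.empty
  PySem.List.sorted
    ((groups.items.filter (fun p => PySem.Set.len p.2 == 3)).map Prod.fst)
    (fun x => x) false

-- ===== PRECONDITION & SPEC =====
def Spec_parse_keypoint_bases_py (columns : List String) (out : List String) : Prop := out = parse_keypoint_bases_py_alt columns
instance (columns : List String) (out : List String) : Decidable (Spec_parse_keypoint_bases_py columns out) := by unfold Spec_parse_keypoint_bases_py; infer_instance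

-- ===== CLAIM (what is proved, stated in full; the proofs are below) =====
def Claim_equal_parse_keypoint_bases_py : Prop := ∀ (columns : List String), Dom_parse_keypoint_bases_py columns → Spec_parse_keypoint_bases_py columns (parse_keypoint_bases_py columns)

-- ===== LEMMAS AND PROOFS =====

-- B's inner per-suffix step and per-column step, named for the proofs (same terms as in the port)
def pvSStep (c : String) (d : PySem.Dict String (PySem.Set String)) (s : String) :
    PySem.Dict String (PySem.Set String) :=
  if PySem.Str.endswith c ("_" ++ s) then
    PySem.Dict.modify d (PySem.Str.slice c none (some (-2))) []
      (fun seen => PySem.Set.add seen s)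
  else d

def pvBStep (d : PySem.Dict String (PySem.Set String)) (c : String) :
    PySem.Dict String (PySem.Set String) :=
  (["x", "y", "z"] : List String).foldl (pvSStep c) d

-- s[:-2] of a string with a known 2-char suffix is the rest
theorem pv_slice_append2 (b p : String) (hp : p.toList.length = 2) :
    PySem.Str.slice (b ++ p) none (some (-2)) = b := by
  apply String.toList_inj.mp
  simp only [PySem.Str.toList_slice, PySem.Chars.slice_eq_listSlice, String.toList_append]
  rw [PySem.List.slice_to_neg_ofNat _ 2 (by omega)]
  simp [hp]

-- a string ending in a 2-char suffix p is s[:-2] ++ p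
theorem pv_eq_slice_append (c p : String) (hp : p.toList.length = 2)
    (h : PySem.Str.endswith c p = true) :
    c = PySem.Str.slice c none (some (-2)) ++ p := by
  simp only [PySem.Str.endswith_eq, PySem.Chars.endswith_iff] at h
  obtain ⟨l, hl⟩ := h
  apply String.toList_inj.mp
  simp only [String.toList_append, PySem.Str.toList_slice, PySem.Chars.slice_eq_listSlice]
  rw [PySem.List.slice_to_neg_ofNat _ 2 (by omega)]
  rw [← hl]
  simp [hp]

theorem pv_endswith_append (b p : String) : PySem.Str.endswith (b ++ p) p = true := by
  simp [PySem.Str.endswith_eq, PySem.Chars.endswith_iff]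

-- membership in the suffix set after one per-suffix step
theorem pv_sstep_mem (c : String) (d : PySem.Dict String (PySem.Set String)) (s b t : String) :
    t ∈ (pvSStep c d s).getD b [] ↔
      t ∈ d.getD b [] ∨
        (PySem.Str.endswith c ("_" ++ s) = true ∧ b = PySem.Str.slice c none (some (-2)) ∧ t = s) := by
  unfold pvSStep
  split_ifs with h
  · rw [PySem.Dict.getD_modify]
    split_ifs with hb
    · subst hb
      rw [PySem.Set.mem_add]
      constructor
      · rintro (hm | rfl)
        · exact Or.inl hm
        · exact Or.inr ⟨h, rfl, rfl⟩
      · rintro (hm | ⟨-, -, rfl⟩)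
        · exact Or.inl hm
        · exact Or.inr rfl
    · constructor
      · exact Or.inl
      · rintro (hm | ⟨-, hb2, -⟩)
        · exact hm
        · exact absurd hb2 hb
  · constructor
    · exact Or.inl
    · rintro (hm | ⟨he, -, -⟩)
      · exact hm
      · exact absurd he h

-- membership after one per-column step
theorem pv_bstep_mem (c : String) (d : PySem.Dict String (PySem.Set String)) (b t : String) :
    t ∈ (pvBStep d c).getD b [] ↔
      t ∈ d.getD b [] ∨ (t ∈ (["x", "y", "z"] : List String) ∧ c = b ++ ("_" ++ t)) := by
  unfold pvBStep
  simp only [List.foldl_cons, List.foldl_nil]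
  rw [pv_sstep_mem, pv_sstep_mem, pv_sstep_mem]
  constructor
  · rintro (((h | ⟨he, rfl, rfl⟩) | ⟨he, rfl, rfl⟩) | ⟨he, rfl, rfl⟩)
    · exact Or.inl h
    · exact Or.inr ⟨by simp, pv_eq_slice_append c ("_" ++ "x") (by decide) he⟩
    · exact Or.inr ⟨by simp, pv_eq_slice_append c ("_" ++ "y") (by decide) he⟩
    · exact Or.inr ⟨by simp, pv_eq_slice_append c ("_" ++ "z") (by decide) he⟩
  · rintro (h | ⟨hs, rfl⟩)
    · exact Or.inl (Or.inl (Or.inl h))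
    · have hx : ∀ u : String, PySem.Str.endswith (b ++ ("_" ++ u)) ("_" ++ u) = true :=
        fun u => pv_endswith_append b ("_" ++ u)
      simp only [List.mem_cons, List.not_mem_nil, or_false] at hs
      rcases hs with rfl | rfl | rfl
      · exact Or.inl (Or.inl (Or.inr ⟨hx "x", (pv_slice_append2 b "_x" (by decide)).symm, rfl⟩))
      · exact Or.inl (Or.inr ⟨hx "y", (pv_slice_append2 b "_y" (by decide)).symm, rfl⟩)
      · exact Or.inr ⟨hx "z", (pv_slice_append2 b "_z" (by decide)).symm, rfl⟩

-- membership after B's whole grouping loop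
theorem pv_fold_mem (l : List String) (d : PySem.Dict String (PySem.Set String)) (b t : String) :
    t ∈ (l.foldl pvBStep d).getD b [] ↔
      t ∈ d.getD b [] ∨ (t ∈ (["x", "y", "z"] : List String) ∧ (b ++ ("_" ++ t)) ∈ l) := by
  induction l generalizing d with
  | nil => simp
  | cons c l ih =>
    simp only [List.foldl_cons, ih, pv_bstep_mem, List.mem_cons]
    constructor
    · rintro ((h | ⟨hs, rfl⟩) | ⟨hs, hm⟩)
      · exact Or.inl h
      · exact Or.inr ⟨hs, Or.inl rfl⟩
      · exact Or.inr ⟨hs, Or.inr hm⟩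
    · rintro (h | ⟨hs, rfl | hm⟩)
      · exact Or.inl (Or.inl h)
      · exact Or.inl (Or.inr ⟨hs, rfl⟩)
      · exact Or.inr ⟨hs, hm⟩

-- keys stay Nodup through B's loop
theorem pv_sstep_keys_nodup (c : String) (d : PySem.Dict String (PySem.Set String)) (s : String)
    (h : d.keys.Nodup) : (pvSStep c d s).keys.Nodup := by
  unfold pvSStep
  split_ifs with he
  · rw [PySem.Dict.keys_modify]
    cases hc : d.contains (PySem.Str.slice c none (some (-2))) with
    | true => rw [PySem.Dict.keys_insert_of_contains _ _ hc]; exact h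
    | false =>
      rw [PySem.Dict.keys_insert_of_not_contains _ _ hc]
      refine List.Nodup.append h (List.nodup_singleton _) ?_
      intro x hx hy
      simp only [List.mem_singleton] at hy
      subst hy
      exact absurd ((PySem.Dict.contains_iff_mem_keys d _).mpr hx) (by simp [hc])
  · exact h

theorem pv_fold_keys_nodup (l : List String) (d : PySem.Dict String (PySem.Set String))
    (h : d.keys.Nodup) : (l.foldl pvBStep d).keys.Nodup := by
  induction l generalizing d with
  | nil => exact h
  | cons c l ih =>
    exact ih _ (pv_sstep_keys_nodup c _ "z" (pv_sstep_keys_nodup c _ "y" (pv_sstep_keys_nodup c d "x" h)))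

-- each stored suffix set stays Nodup through B's loop
theorem pv_sstep_val_nodup (c : String) (d : PySem.Dict String (PySem.Set String)) (s : String)
    (h : ∀ b, (d.getD b ([] : PySem.Set String)).Nodup) :
    ∀ b, ((pvSStep c d s).getD b ([] : PySem.Set String)).Nodup := by
  intro b
  unfold pvSStep
  split_ifs with he
  · rw [PySem.Dict.getD_modify]
    split_ifs with hb
    · exact PySem.Set.nodup_add _ _ (h _)
    · exact h b
  · exact h b

theorem pv_fold_val_nodup (l : List String) (d : PySem.Dict String (PySem.Set String))
    (h : ∀ b, (d.getD b ([] : PySem.Set String)).Nodup) :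
    ∀ b, ((l.foldl pvBStep d).getD b ([] : PySem.Set String)).Nodup := by
  induction l generalizing d with
  | nil => exact h
  | cons c l ih =>
    exact ih _ (pv_sstep_val_nodup c _ "z" (pv_sstep_val_nodup c _ "y" (pv_sstep_val_nodup c d "x" h)))

-- a Nodup sublist of {"x","y","z"} has all three elements iff it has length 3
theorem pv_len3_iff (S : List String) (hnd : S.Nodup)
    (hsub : ∀ t ∈ S, t ∈ (["x", "y", "z"] : List String)) :
    (S.length = 3 ↔ ("x" ∈ S ∧ "y" ∈ S ∧ "z" ∈ S)) := by
  have hsp : S.Subperm ["x", "y", "z"] := hnd.subperm hsub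
  constructor
  · intro hl
    have hperm : S.Perm ["x", "y", "z"] := hsp.perm_of_length_le (by simp [hl])
    refine ⟨hperm.mem_iff.mpr (by simp), hperm.mem_iff.mpr (by simp), hperm.mem_iff.mpr (by simp)⟩
  · rintro ⟨hx, hy, hz⟩
    have h2 : (["x", "y", "z"] : List String).Subperm S :=
      List.Nodup.subperm (by decide) (by intro t ht; simp only [List.mem_cons, List.not_mem_nil, or_false] at ht; rcases ht with rfl | rfl | rfl <;> assumption)
    have := h2.length_le
    have := hsp.length_le
    simp at *; omega

-- membership in one of B's suffix-indexed groups, from empty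
theorem pv_groups_mem (columns : List String) (b t : String) :
    t ∈ (columns.foldl pvBStep PySem.Dict.empty).getD b [] ↔
      (t ∈ (["x", "y", "z"] : List String) ∧ (b ++ ("_" ++ t)) ∈ columns) := by
  rw [pv_fold_mem]
  simp [PySem.Dict.getD_empty]

-- ===== VERDICT (by name: the statement is the Claim_ definition above) =====
theorem parse_keypoint_bases_py_spec : Claim_equal_parse_keypoint_bases_py := by
  intro columns _
  show parse_keypoint_bases_py columns = parse_keypoint_bases_py_alt columns
  unfold parse_keypoint_bases_py parse_keypoint_bases_py_alt
  simp only []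
  set cols := PySem.Set.ofList columns with hcols
  -- name B's grouping loop
  have hB : columns.foldl (fun d c =>
      (["x", "y", "z"] : List String).foldl (fun d s =>
        if PySem.Str.endswith c ("_" ++ s) then
          PySem.Dict.modify d (PySem.Str.slice c none (some (-2))) []
            (fun seen => PySem.Set.add seen s)
        else d) d) PySem.Dict.empty = columns.foldl pvBStep PySem.Dict.empty := rfl
  rw [hB]
  set groups := columns.foldl pvBStep PySem.Dict.empty with hgroups
  have hknd : groups.keys.Nodup := pv_fold_keys_nodup columns _ PySem.Dict.nodup_keys_empty
  have hvnd := pv_fold_val_nodup columns PySem.Dict.empty (by intro b; simp [PySem.Dict.getD_empty])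
  -- rewrite A's loop body into a single filter/map shape
  have hg : (fun (bases : List String) c =>
      if PySem.Str.endswith c "_x" then
        let b := PySem.Str.slice c none (some (-2))
        if PySem.Set.contains cols (b ++ "_y") && PySem.Set.contains cols (b ++ "_z")
        then bases ++ [b] else bases
      else bases)
    = fun (acc : List String) c =>
      if (PySem.Str.endswith c "_x"
            && PySem.Set.contains cols (PySem.Str.slice c none (some (-2)) ++ "_y")
            && PySem.Set.contains cols (PySem.Str.slice c none (some (-2)) ++ "_z"))
        then acc ++ [PySem.Str.slice c none (some (-2))] else acc := by
    funext acc c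
    cases h1 : PySem.Str.endswith c "_x"
    · simp only [Bool.false_and, if_false, Bool.false_eq_true]
    · simp only [Bool.true_and, if_true]
  rw [hg, PySem.List.foldl_append_if]
  simp only [List.nil_append]
  -- rewrite B's item scan into a filter over the (Nodup) keys
  rw [PySem.Dict.items_eq_map_keys groups hknd ([] : PySem.Set String), List.filter_map,
      List.map_map]
  have hcomp : (Prod.fst ∘ fun k => (k, groups.getD k ([] : PySem.Set String))) = id := rfl
  rw [hcomp, List.map_id]
  apply PySem.List.sorted_eq_sorted_of_perm _ _ _ (fun _ _ h => h)
  apply (List.perm_ext_iff_of_nodup ?_ ?_).mpr ?_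
  · -- nodup of A's list
    apply List.Nodup.map_on ?_ ((PySem.Set.nodup_ofList columns).filter _)
    intro c1 h1 c2 h2 hfe
    rw [List.mem_filter] at h1 h2
    have e1 := pv_eq_slice_append c1 "_x" (by decide)
      (by have := h1.2; simp only [Bool.and_eq_true] at this; exact this.1.1)
    have e2 := pv_eq_slice_append c2 "_x" (by decide)
      (by have := h2.2; simp only [Bool.and_eq_true] at this; exact this.1.1)
    rw [e1, e2, hfe]
  · -- nodup of B's list
    exact hknd.filter _
  · -- same members
    intro b
    simp only [List.mem_map, List.mem_filter, Bool.and_eq_true, PySem.Set.contains_iff,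
      PySem.Set.mem_ofList, hcols, Function.comp_apply]
    have hlen : (PySem.Set.len (groups.getD b ([] : PySem.Set String)) == 3) = true ↔
        (groups.getD b ([] : PySem.Set String)).length = 3 := by
      simp [PySem.Set.len]; omega
    have hchar : (groups.getD b ([] : PySem.Set String)).length = 3 ↔
        ((b ++ "_x") ∈ columns ∧ (b ++ "_y") ∈ columns ∧ (b ++ "_z") ∈ columns) := by
      rw [pv_len3_iff _ (hvnd b) (fun t ht => ((pv_groups_mem columns b t).mp ht).1)]
      constructor
      · rintro ⟨hx, hy, hz⟩
        exact ⟨((pv_groups_mem columns b "x").mp hx).2,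
               ((pv_groups_mem columns b "y").mp hy).2,
               ((pv_groups_mem columns b "z").mp hz).2⟩
      · rintro ⟨hx, hy, hz⟩
        exact ⟨(pv_groups_mem columns b "x").mpr ⟨by simp, hx⟩,
               (pv_groups_mem columns b "y").mpr ⟨by simp, hy⟩,
               (pv_groups_mem columns b "z").mpr ⟨by simp, hz⟩⟩
    constructor
    · rintro ⟨c, ⟨hc, ⟨hend, hy⟩, hz⟩, rfl⟩
      have hx : (PySem.Str.slice c none (some (-2)) ++ "_x") ∈ columns := by
        rw [← pv_eq_slice_append c "_x" (by decide) hend]; exact hc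
      refine ⟨?_, hlen.mpr (hchar.mpr ⟨hx, hy, hz⟩)⟩
      -- b ∈ groups.keys since its suffix set is nonempty
      by_contra hk
      have hcont : groups.contains (PySem.Str.slice c none (some (-2))) = false := by
        cases hcc : groups.contains (PySem.Str.slice c none (some (-2)))
        · rfl
        · exact absurd ((PySem.Dict.contains_iff_mem_keys groups _).mp hcc) hk
      have := (pv_groups_mem columns (PySem.Str.slice c none (some (-2))) "x").mpr ⟨by simp, hx⟩
      rw [PySem.Dict.getD_of_not_contains _ _ hcont] at this
      simp at this
    · rintro ⟨hk, hl3⟩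
      obtain ⟨hx, hy, hz⟩ := hchar.mp (hlen.mp hl3)
      exact ⟨b ++ "_x", ⟨hx, ⟨pv_endswith_append b "_x",
        by rw [pv_slice_append2 b "_x" (by decide)]; exact hy⟩,
        by rw [pv_slice_append2 b "_x" (by decide)]; exact hz⟩,
        pv_slice_append2 b "_x" (by decide)⟩
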